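-- pv_equiv track=rewrite | github.com/klein203/JupyterNotebook | cmu15-112/week8/hw8.py | movieAwards
-- ===== SOURCE A (Python) =====
-- def movieAwards(oscarResults):
--     winners = set()
--     winnerCount = dict()
--
--     for ele in oscarResults:
--         (_, winner) = ele
--         if winner not in winners:
--             winners.add(winner)
--             winnerCount[winner] = 0
--
--         winnerCount[winner] += 1
--     return winnerCount
-- ===== SOURCE B (Python) =====
-- def movieAwards(oscarResults):
--     names = [winner for (_, winner) in oscarResults]
--     return {w: names.count(w) for w in dict.fromkeys(names)}
-- ===== Notes on version B (the rewrite author's own statement) =====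
-- stated objective: simpler
-- what changed: Replaces the seen-set plus incremental dict accumulation loop with a two-pass dedup-then-count: collect winner names, deduplicate in first-occurrence order, and build the dict by counting each distinct name once.
import Mathlib
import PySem

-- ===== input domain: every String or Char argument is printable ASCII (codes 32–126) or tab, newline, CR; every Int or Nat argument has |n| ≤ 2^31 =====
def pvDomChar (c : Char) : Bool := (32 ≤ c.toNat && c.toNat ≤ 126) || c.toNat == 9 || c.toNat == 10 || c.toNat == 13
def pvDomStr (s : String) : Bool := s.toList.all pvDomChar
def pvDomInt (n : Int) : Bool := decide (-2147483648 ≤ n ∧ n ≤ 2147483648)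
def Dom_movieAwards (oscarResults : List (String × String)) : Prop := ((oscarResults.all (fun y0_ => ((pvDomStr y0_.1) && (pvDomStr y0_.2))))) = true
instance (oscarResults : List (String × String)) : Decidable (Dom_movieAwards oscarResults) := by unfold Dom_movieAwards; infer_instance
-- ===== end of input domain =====

-- B replaces A's single seen-set + incremental-count loop by a two-pass dedup-then-count
-- decomposition (simpler); the return values are identical.

-- ===== PORT A =====
-- step of A's for-loop: state = (winners : set, winnerCount : dict)
def movieAwardsStep (st : PySem.Set String × PySem.Dict String Int) (ele : String × String) :
    PySem.Set String × PySem.Dict String Int :=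
  let winner := ele.2
  let st' := if PySem.Set.contains st.1 winner then st
             else (PySem.Set.add st.1 winner, st.2.insert winner 0)
  (st'.1, st'.2.insert winner (st'.2.getD winner 0 + 1))  -- winnerCount[winner] += 1 (key present)

def movieAwards (oscarResults : List (String × String)) : List (String × Int) :=
  (oscarResults.foldl movieAwardsStep (PySem.Set.empty, PySem.Dict.empty)).2.items

-- ===== PORT B =====
-- names = [winner for (_, winner) in oscarResults]; {w: names.count(w) for w in dict.fromkeys(names)}
-- (a dict comprehension over the distinct keys, in order, IS this items list)
def movieAwards_alt (oscarResults : List (String × String)) : List (String × Int) :=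
  let names := oscarResults.map (fun p => p.2)
  (PySem.List.dedup names).map (fun w => (w, (names.count w : Int)))

-- ===== PRECONDITION & SPEC =====
def Spec_movieAwards (oscarResults : List (String × String)) (out : List (String × Int)) : Prop := out = movieAwards_alt oscarResults
instance (oscarResults : List (String × String)) (out : List (String × Int)) : Decidable (Spec_movieAwards oscarResults out) := by unfold Spec_movieAwards; infer_instance

-- ===== CLAIM (what is proved, stated in full; the proofs are below) =====
def Claim_equal_movieAwards : Prop := ∀ (oscarResults : List (String × String)), Dom_movieAwards oscarResults → Spec_movieAwards oscarResults (movieAwards oscarResults)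

-- ===== LEMMAS AND PROOFS =====

-- Under the invariant that the seen-set and the dict have the same membership,
-- A's loop body is exactly the Counter step d.insert w (d.getD w 0 + 1) on the dict component.
theorem movieAwards_loop_eq (l : List (String × String)) (s : PySem.Set String)
    (d : PySem.Dict String Int) (hinv : ∀ k, PySem.Set.contains s k = d.contains k) :
    (l.foldl movieAwardsStep (s, d)).2 =
      (l.map (fun p => p.2)).foldl (fun d x => d.insert x (d.getD x 0 + 1)) d := by
  induction l generalizing s d with
  | nil => rfl
  | cons p t ih =>
    simp only [List.foldl_cons, List.map_cons]
    by_cases h : PySem.Set.contains s p.2 = true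
    · have hstep : movieAwardsStep (s, d) p = (s, d.insert p.2 (d.getD p.2 0 + 1)) := by
        simp only [movieAwardsStep]; rw [if_pos h]
      rw [hstep]
      refine ih _ _ ?_
      intro k
      rw [PySem.Dict.contains_insert, ← hinv k]
      cases hk : k == p.2 with
      | false => simp
      | true =>
        simp only [eq_of_beq hk, Bool.true_or]
        simpa [PySem.Set.contains] using h
    · have h' : PySem.Set.contains s p.2 = false := by simpa using h
      have hd : d.contains p.2 = false := by rw [← hinv]; exact h'
      have hstep : movieAwardsStep (s, d) p =
          (PySem.Set.add s p.2, d.insert p.2 (d.getD p.2 0 + 1)) := by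
        simp only [movieAwardsStep]
        rw [if_neg (by simpa [PySem.Set.contains] using h')]
        rw [PySem.Dict.getD_of_not_contains d 0 hd, PySem.Dict.getD_insert_self,
          PySem.Dict.insert_insert_self]
      rw [hstep]
      refine ih _ _ ?_
      intro k
      rw [PySem.Dict.contains_insert, ← hinv k]
      by_cases hk : k = p.2
      · subst hk; simp [PySem.Set.contains, PySem.Set.mem_add]
      · simp [PySem.Set.contains, PySem.Set.mem_add, hk]

theorem movieAwards_spec_aux (oscarResults : List (String × String)) :
    movieAwards oscarResults = movieAwards_alt oscarResults := by
  unfold movieAwards movieAwards_alt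
  rw [movieAwards_loop_eq _ _ _ (by intro k; simp [PySem.Set.contains, PySem.Set.empty])]
  rw [PySem.Dict.foldl_insert_getD_add_one_eq_counter, PySem.Dict.items_counter]
  simp [PySem.List.dedup_eq_ofList]

-- ===== VERDICT (by name: the statement is the Claim_ definition above) =====
theorem movieAwards_spec : Claim_equal_movieAwards := by
  intro xs _
  exact movieAwards_spec_aux xs
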